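-- pv_equiv track=rewrite | github.com/ryanyxw/FlexOlmo | src/offline_evals/run_btm_weight_merged_eval.py | merge_lists_of_dicts
-- ===== SOURCE A (Python) =====
-- def merge_lists_of_dicts(dicts_list):
--     """
--     >>> merge_dicts_in_list([{"a": 1}, {"b": 2}])
--     >>> {'a': 1, 'b': 2}
--     """
--     merged_entry = {}
--     for d in dicts_list:
--         for key, value in d.items():
--             if key in merged_entry:
--                 raise ValueError(f"Duplicate key '{key}' found.")
--             merged_entry[key] = value
--     return merged_entry
-- ===== SOURCE B (Python) =====
-- def merge_lists_of_dicts(dicts_list):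
--     pairs = [(k, v) for d in dicts_list for k, v in d.items()]
--     keys = [k for k, _ in pairs]
--     if len(keys) != len(set(keys)):
--         seen = set()
--         for k in keys:
--             if k in seen:
--                 raise ValueError(f"Duplicate key '{k}' found.")
--             seen.add(k)
--     return dict(pairs)
-- ===== Notes on version B (the rewrite author's own statement) =====
-- stated objective: alternative
-- what changed: B flattens all (key,value) pairs first, decides duplicate existence by one len-vs-set-len comparison, and builds the result with a single dict() call instead of A's nested loops with a per-key membership check during construction; on a duplicate it scans the flat key list to raise A's exact ValueError for the first repeated key.
import Mathlib
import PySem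

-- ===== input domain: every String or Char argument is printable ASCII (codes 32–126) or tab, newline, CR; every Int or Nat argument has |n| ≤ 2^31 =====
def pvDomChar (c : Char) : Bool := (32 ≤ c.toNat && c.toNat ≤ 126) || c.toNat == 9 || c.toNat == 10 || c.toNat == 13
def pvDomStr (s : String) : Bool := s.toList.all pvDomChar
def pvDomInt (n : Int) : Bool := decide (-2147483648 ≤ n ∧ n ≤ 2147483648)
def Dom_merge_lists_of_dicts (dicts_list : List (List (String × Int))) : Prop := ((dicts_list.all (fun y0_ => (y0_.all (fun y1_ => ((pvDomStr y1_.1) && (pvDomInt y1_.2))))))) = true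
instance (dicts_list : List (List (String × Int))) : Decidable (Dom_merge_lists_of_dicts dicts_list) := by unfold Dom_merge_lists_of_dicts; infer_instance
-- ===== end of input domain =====

-- B flattens all pairs, decides duplicates by one length-vs-set-length comparison and builds
-- the dict in a single pass, instead of A's nested loops with a membership check per key
-- (objective: alternative decomposition, same cost).


-- ===== PORT A =====
-- Nested loops: for each dict, for each (key, value), check membership in the accumulated
-- dict and insert.  Where Python raises ValueError (duplicate key) the port leaves the
-- accumulator unchanged; those inputs are excluded by Pre_.
def merge_lists_of_dicts (dicts_list : List (List (String × Int))) : List (String × Int) :=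
  (dicts_list.foldl
    (fun merged_entry d =>
      d.foldl
        (fun m p =>
          if m.contains p.1 then m  -- Python: raise ValueError; outside Pre_
          else m.insert p.1 p.2)
        merged_entry)
    PySem.Dict.empty).items

-- ===== PORT B =====
-- Flatten all pairs; one len-vs-set-len comparison decides whether a duplicate exists
-- (Python then raises ValueError; outside Pre_ the port returns [] there); otherwise
-- dict(pairs) in one pass.
def merge_lists_of_dicts_alt (dicts_list : List (List (String × Int))) : List (String × Int) :=
  let pairs := dicts_list.flatten
  let keys := pairs.map Prod.fst
  if keys.length ≠ (PySem.Set.ofList keys).length then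
    []  -- Python: scan keys and raise ValueError at the first repeat; outside Pre_
  else
    (PySem.Dict.ofList pairs).items

-- ===== PRECONDITION & SPEC =====
-- Pre_ excludes exactly the inputs with a repeated key across (or within) the dicts,
-- on which Python A raises ValueError.
def Pre_merge_lists_of_dicts (dicts_list : List (List (String × Int))) : Prop :=
  (dicts_list.flatten.map Prod.fst).Nodup
instance (dicts_list : List (List (String × Int))) : Decidable (Pre_merge_lists_of_dicts dicts_list) := by unfold Pre_merge_lists_of_dicts; infer_instance

def pvWitness_merge_lists_of_dicts : (List (List (String × Int))) := [[("a", 1)], [("b", 2), ("c", 3)]]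

def Spec_merge_lists_of_dicts (dicts_list : List (List (String × Int))) (out : List (String × Int)) : Prop := out = merge_lists_of_dicts_alt dicts_list
instance (dicts_list : List (List (String × Int))) (out : List (String × Int)) : Decidable (Spec_merge_lists_of_dicts dicts_list out) := by unfold Spec_merge_lists_of_dicts; infer_instance

-- ===== CLAIM (what is proved, stated in full; the proofs are below) =====
def Claim_equal_merge_lists_of_dicts : Prop := ∀ (dicts_list : List (List (String × Int))), Dom_merge_lists_of_dicts dicts_list → Pre_merge_lists_of_dicts dicts_list → Spec_merge_lists_of_dicts dicts_list (merge_lists_of_dicts dicts_list)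

-- ===== LEMMAS AND PROOFS =====

-- Folding fresh pairs (keys disjoint from the accumulator and pairwise distinct) into a dict
-- just appends them, both for A's guarded step and for the plain insert step of dict(pairs).
lemma fold_fresh (pairs : List (String × Int)) (d : PySem.Dict String Int)
    (h : (d.items.map Prod.fst ++ pairs.map Prod.fst).Nodup) :
    List.foldl (fun m p => if m.contains p.1 then m else m.insert p.1 p.2) d pairs
        = ⟨d.items ++ pairs⟩ ∧
    List.foldl (fun (acc : PySem.Dict String Int) p => acc.insert p.1 p.2) d pairs
        = ⟨d.items ++ pairs⟩ := by
  induction pairs generalizing d with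
  | nil => simp
  | cons p rest ih =>
    have hfresh : p.1 ∉ d.items.map Prod.fst := by
      have := h.disjoint
      intro hm
      exact this hm (by simp)
    have hc : d.contains p.1 = false := by
      simp only [PySem.Dict.contains, List.any_eq_true, beq_iff_eq, Bool.eq_false_iff, ne_eq]
      intro ⟨q, hq, hq1⟩
      exact hfresh (List.mem_map.mpr ⟨q, hq, hq1⟩)
    have hins : d.insert p.1 p.2 = ⟨d.items ++ [p]⟩ := by
      simp [PySem.Dict.insert, hc]
    have h' : ((⟨d.items ++ [p]⟩ : PySem.Dict String Int).items.map Prod.fst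
        ++ rest.map Prod.fst).Nodup := by
      simpa using h
    have := ih ⟨d.items ++ [p]⟩ h'
    refine ⟨?_, ?_⟩ <;>
      simp only [List.foldl_cons, hc, Bool.false_eq_true, if_false, hins,
        this.1, this.2] <;> simp

-- Building the Python set of a duplicate-free list appends every element.
lemma set_ofList_of_nodup (keys s : List String) (h : (s ++ keys).Nodup) :
    List.foldl PySem.Set.add s keys = s ++ keys := by
  induction keys generalizing s with
  | nil => simp
  | cons k rest ih =>
    have hk : k ∉ s := by
      have := h.disjoint
      intro hm
      exact this hm (by simp)
    have : PySem.Set.add s k = s ++ [k] := by simp [PySem.Set.add, hk]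
    rw [List.foldl_cons, this, ih (s ++ [k]) (by simpa using h)]
    simp

-- ===== VERDICT (by name: the statement is the Claim_ definition above) =====
theorem merge_lists_of_dicts_spec : Claim_equal_merge_lists_of_dicts := by
  intro dicts_list _ hpre
  unfold Pre_merge_lists_of_dicts at hpre
  unfold Spec_merge_lists_of_dicts merge_lists_of_dicts merge_lists_of_dicts_alt
  have hA := (fold_fresh dicts_list.flatten PySem.Dict.empty
      (by simpa [PySem.Dict.empty] using hpre)).1
  have hB := (fold_fresh dicts_list.flatten PySem.Dict.empty
      (by simpa [PySem.Dict.empty] using hpre)).2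
  have hset : PySem.Set.ofList (dicts_list.flatten.map Prod.fst)
      = dicts_list.flatten.map Prod.fst := by
    simpa using set_ofList_of_nodup (dicts_list.flatten.map Prod.fst) [] (by simpa using hpre)
  rw [← List.foldl_flatten, hA]
  simp only [hset, ne_eq, not_true_eq_false, if_false]
  simp only [PySem.Dict.ofList, PySem.Dict.update]
  rw [hB]
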